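-- pv_equiv track=rewrite | github.com/ZHANGLAOJIU/LEARNING-GYM-AI | try.py | minimalKSum
-- ===== SOURCE A (Python) =====
-- def minimalKSum(nums, k):
--     nums.append(0)
--     nums = list(set(nums))
--     nums.sort()
--     res = 0
--     for i in range(1, len(nums)):
--         if nums[i] - nums[i - 1] - 1 < k:
--             res += int((nums[i] + nums[i - 1]) * (nums[i] - nums[i - 1] - 1) / 2)
--             k -= nums[i] - nums[i - 1] - 1
--         else:
--             res += int((2 * nums[i - 1] + 1 + k) * k / 2)
--             return int(res)
--     res += int((2 * nums[-1] + 1 + k) * k / 2)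
--     return int(res)
-- ===== SOURCE B (Python) =====
-- def minimalKSum(nums, k):
--     # Keep A's caller-visible mutation: append 0 before anything else.
--     nums.append(0)
--     s = set(nums)
--     n = min(s)
--     res = 0
--     while k > 0:
--         n += 1
--         if n not in s:
--             res += n
--             k -= 1
--     return res
-- ===== Notes on version B (the rewrite author's own statement) =====
-- stated objective: simpler
-- what changed: B replaces A's sort-then-gap-arithmetic (triangular-number sums per gap with an early return) by a plain counting scan: a set for membership, then walk the integers upward from min, adding each absent one until k hits 0; the same append(0) mutation is kept.
-- outside the precondition, e.g. on minimalKSum([], -3): A returns 3, B returns 0; on minimalKSum([-2143995941], 6114275): A returns -13090288599712824, B returns -13090288599712825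
import Mathlib
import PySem

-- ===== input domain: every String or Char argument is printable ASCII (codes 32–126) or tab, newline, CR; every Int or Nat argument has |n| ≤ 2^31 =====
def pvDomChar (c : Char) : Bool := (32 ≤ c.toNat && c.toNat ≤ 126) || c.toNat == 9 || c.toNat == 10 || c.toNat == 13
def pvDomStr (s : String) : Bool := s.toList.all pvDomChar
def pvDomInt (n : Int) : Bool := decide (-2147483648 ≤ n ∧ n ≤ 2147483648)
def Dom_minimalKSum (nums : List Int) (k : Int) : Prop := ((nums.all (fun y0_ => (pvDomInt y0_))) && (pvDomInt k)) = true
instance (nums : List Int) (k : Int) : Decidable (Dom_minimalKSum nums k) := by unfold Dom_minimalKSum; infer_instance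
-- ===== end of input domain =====

-- B replaces A's sort-then-gap-arithmetic by a counting scan over the integers with set membership.
-- The equivalence is about the RETURN value; both Pythons perform the same nums.append(0) mutation.

-- ===== PORT A =====
-- the loop 'for i in range(1, len(nums))' over the sorted deduplicated list, carried as (prev, rest);
-- Python's int(x / 2) is ported as exact integer division x / 2: under Pre_ the numerator is even and
-- |numerator| < 2^53, where float division followed by int() is exact.
def minimalKSumLoop (prev : Int) (rest : List Int) (k : Int) (res : Int) : Int :=
  match rest with
  | [] => res + (2 * prev + 1 + k) * k / 2
  | x :: xs =>
    if x - prev - 1 < k then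
      minimalKSumLoop x xs (k - (x - prev - 1)) (res + (x + prev) * (x - prev - 1) / 2)
    else
      res + (2 * prev + 1 + k) * k / 2

def minimalKSum (nums : List Int) (k : Int) : Int :=
  -- nums.append(0); nums = list(set(nums)); nums.sort()
  match PySem.List.sorted (PySem.Set.ofList (nums ++ [0])) (fun x => x) false with
  | [] => 0  -- unreachable: 0 is always in the list
  | x :: xs => minimalKSumLoop x xs k 0

-- ===== PORT B =====
-- termination facts for the while loop: each step either consumes k (a missing integer) or
-- passes one of the finitely many set elements above n
theorem pvFilterLeMono (u : List Int) (m : Int) :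
    (u.filter (fun x => decide (m + 1 < x))).length ≤ (u.filter (fun x => decide (m < x))).length := by
  induction u with
  | nil => simp
  | cons b v ihv =>
    by_cases hb1 : m + 1 < b
    · have hb2 : m < b := by omega
      simp [hb1, hb2]; omega
    · by_cases hb2 : m < b
      · simp [hb1, hb2]; omega
      · simp [hb1, hb2]; omega

theorem pvFilterSuccLt (s : List Int) (n : Int) (h : (n + 1) ∈ s) :
    (s.filter (fun x => decide (n + 1 < x))).length < (s.filter (fun x => decide (n < x))).length := by
  induction s with
  | nil => cases h
  | cons a t ih =>
    by_cases ha : a = n + 1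
    · subst ha
      have h2 : n < n + 1 := by omega
      simp [h2]
      exact pvFilterLeMono t n
    · have ht : (n + 1) ∈ t := by
        rcases List.mem_cons.mp h with h | h
        · exact absurd h.symm ha
        · exact h
      by_cases hb1 : n + 1 < a
      · have hb2 : n < a := by omega
        simp only [List.filter_cons, hb1, hb2, decide_true, if_pos, List.length_cons]
        exact Nat.succ_lt_succ (ih ht)
      · have hb2 : ¬ n < a := by omega
        simp only [List.filter_cons, hb1, hb2, decide_false, if_neg, Bool.false_eq_true,
          not_false_eq_true]
        exact ih ht

-- the while loop: while k > 0: n += 1; if n not in s: res += n; k -= 1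
def minimalKSumScan (s : PySem.Set Int) (n : Int) (k : Int) (res : Int) : Int :=
  if 0 < k then
    if PySem.Set.contains s (n + 1) then
      minimalKSumScan s (n + 1) k res
    else
      minimalKSumScan s (n + 1) (k - 1) (res + (n + 1))
  else
    res
termination_by k.toNat + (s.filter (fun x => decide (n < x))).length
decreasing_by
  · rename_i hk hm
    have hmem : (n + 1) ∈ s := (PySem.Set.contains_iff s (n + 1)).mp hm
    have := pvFilterSuccLt s n hmem
    omega
  · rename_i hk _hm
    have := pvFilterLeMono s n
    omega

def minimalKSum_alt (nums : List Int) (k : Int) : Int :=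
  -- nums.append(0); s = set(nums); n = min(s); res = 0; <while loop>; return res
  match PySem.List.min? (PySem.Set.ofList (nums ++ [0])) (fun x => x) with
  | none => 0  -- unreachable: 0 is always in the set
  | some m => minimalKSumScan (PySem.Set.ofList (nums ++ [0])) m k 0

-- ===== PRECONDITION & SPEC =====
-- Pre_ excludes (a) negative k, outside the function's natural domain, where A's trailing series
-- formula returns an accidental value while B's loop naturally returns 0, and (b) magnitudes above
-- 2^24, where A's float division int(x / 2) can round (the numerator can reach 2^53 in magnitude)
-- so A's returned value is a float artefact that exact integer arithmetic does not reproduce.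
def Pre_minimalKSum (nums : List Int) (k : Int) : Prop :=
  0 ≤ k ∧ k ≤ 16777216 ∧ ∀ x ∈ nums, -16777216 ≤ x ∧ x ≤ 16777216
instance (nums : List Int) (k : Int) : Decidable (Pre_minimalKSum nums k) := by
  unfold Pre_minimalKSum; infer_instance

def pvWitness_minimalKSum : List Int × Int := ([3, 1], 2)

def Spec_minimalKSum (nums : List Int) (k : Int) (out : Int) : Prop := out = minimalKSum_alt nums k
instance (nums : List Int) (k : Int) (out : Int) : Decidable (Spec_minimalKSum nums k out) := by
  unfold Spec_minimalKSum; infer_instance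

-- ===== CLAIM (what is proved, stated in full; the proofs are below) =====
def Claim_equal_minimalKSum : Prop := ∀ (nums : List Int) (k : Int), Dom_minimalKSum nums k → Pre_minimalKSum nums k → Spec_minimalKSum nums k (minimalKSum nums k)

-- ===== LEMMAS AND PROOFS =====

-- shifting the gap loop one integer to the right is a pure arithmetic identity
theorem loop_shift (rest : List Int) (p k res : Int) :
    minimalKSumLoop p rest k res = minimalKSumLoop (p + 1) rest (k - 1) (res + (p + 1)) := by
  cases rest with
  | nil =>
    simp only [minimalKSumLoop]
    have hnum : (2 * p + 1 + k) * k = (2 * (p + 1) + 1 + (k - 1)) * (k - 1) + (p + 1) * 2 := by ring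
    rw [hnum, Int.add_mul_ediv_right _ _ (by norm_num : (2 : Int) ≠ 0)]
    ring
  | cons x xs =>
    simp only [minimalKSumLoop]
    have hcond : (x - p - 1 < k) ↔ (x - (p + 1) - 1 < k - 1) := by omega
    by_cases hc : x - p - 1 < k
    · rw [if_pos hc, if_pos (hcond.mp hc)]
      have harg : k - (x - p - 1) = k - 1 - (x - (p + 1) - 1) := by ring
      have hacc : res + (x + p) * (x - p - 1) / 2 = res + (p + 1) + (x + (p + 1)) * (x - (p + 1) - 1) / 2 := by
        have hnum : (x + p) * (x - p - 1) = (x + (p + 1)) * (x - (p + 1) - 1) + (p + 1) * 2 := by ring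
        rw [hnum, Int.add_mul_ediv_right _ _ (by norm_num : (2 : Int) ≠ 0)]
        ring
      rw [harg, hacc]
    · rw [if_neg hc, if_neg (fun h => hc (hcond.mpr h))]
      have hnum : (2 * p + 1 + k) * k = (2 * (p + 1) + 1 + (k - 1)) * (k - 1) + (p + 1) * 2 := by ring
      rw [hnum, Int.add_mul_ediv_right _ _ (by norm_num : (2 : Int) ≠ 0)]
      ring

-- the counting scan over a membership set equals the gap loop over the sorted list of the
-- set's elements above the scan position
theorem scan_eq_loop (N : Nat) : ∀ (s : List Int) (p k res : Int) (rest : List Int),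
    k.toNat + rest.length = N →
    0 ≤ k →
    rest.Pairwise (· < ·) →
    (∀ x ∈ rest, x ∈ s ∧ p < x) →
    (∀ x ∈ s, p < x → x ∈ rest) →
    minimalKSumScan s p k res = minimalKSumLoop p rest k res := by
  induction N using Nat.strong_induction_on with
  | _ N ih =>
    intro s p k res rest hN hk hpw hmem hcomp
    by_cases hkpos : 0 < k
    · by_cases hin : (p + 1) ∈ s
      · -- p + 1 must be the head of rest
        have hr : (p + 1) ∈ rest := hcomp (p + 1) hin (by omega)
        cases rest with
        | nil => cases hr
        | cons y ys =>
          have hy : y = p + 1 := by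
            rcases List.mem_cons.mp hr with hr | hr
            · omega
            · have hyy := (List.pairwise_cons.mp hpw).1 _ hr
              have h2 := (hmem y (List.mem_cons_self)).2
              omega
          subst hy
          rw [minimalKSumScan, if_pos hkpos,
            if_pos ((PySem.Set.contains_iff s (p + 1)).mpr hin)]
          have hstep : minimalKSumLoop p ((p + 1) :: ys) k res = minimalKSumLoop (p + 1) ys k res := by
            simp only [minimalKSumLoop]
            rw [if_pos (by omega : p + 1 - p - 1 < k)]
            norm_num
          rw [hstep]
          exact ih (k.toNat + ys.length) (by simp at hN; omega) s (p + 1) k res ys rfl hk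
            (List.pairwise_cons.mp hpw).2
            (fun x hx => ⟨(hmem x (List.mem_cons_of_mem _ hx)).1,
              (List.pairwise_cons.mp hpw).1 x hx⟩)
            (fun x hxs hxgt => by
              rcases List.mem_cons.mp (hcomp x hxs (by omega)) with h | h
              · omega
              · exact h)
      · rw [minimalKSumScan, if_pos hkpos,
          if_neg (fun h => hin ((PySem.Set.contains_iff s (p + 1)).mp h))]
        have hrec := ih ((k - 1).toNat + rest.length) (by omega) s (p + 1) (k - 1) (res + (p + 1)) rest
          rfl (by omega) hpw
          (fun x hx => by
            have h1 := hmem x hx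
            have hne : x ≠ p + 1 := fun he => hin (he ▸ h1.1)
            exact ⟨h1.1, by omega⟩)
          (fun x hxs hxgt => hcomp x hxs (by omega))
        rw [hrec, ← loop_shift]
    · -- k = 0 here
      rw [minimalKSumScan, if_neg hkpos]
      cases rest with
      | nil =>
        simp only [minimalKSumLoop]
        have : (2 * p + 1 + k) * k / 2 = 0 := by
          have hk0 : k = 0 := by omega
          rw [hk0]; norm_num
        omega
      | cons x xs =>
        have hx := (hmem x (List.mem_cons_self)).2
        simp only [minimalKSumLoop]
        rw [if_neg (by omega : ¬ x - p - 1 < k)]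
        have : (2 * p + 1 + k) * k / 2 = 0 := by
          have hk0 : k = 0 := by omega
          rw [hk0]; norm_num
        omega

-- ===== VERDICT (by name: the statement is the Claim_ definition above) =====
theorem minimalKSum_spec : Claim_equal_minimalKSum := by
  intro nums k _hdom hpre
  obtain ⟨hk, -, -⟩ := hpre
  have h0s : (0 : Int) ∈ PySem.Set.ofList (nums ++ [0]) :=
    (PySem.Set.mem_ofList _ _).mpr (by simp)
  unfold Spec_minimalKSum minimalKSum minimalKSum_alt
  cases hLcases : PySem.List.sorted (PySem.Set.ofList (nums ++ [0])) (fun x => x) false with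
  | nil =>
    exfalso
    have hperm := PySem.List.sorted_perm (PySem.Set.ofList (nums ++ [0])) (fun x : Int => x) false
    rw [hLcases] at hperm
    exact absurd (hperm.mem_iff.mpr h0s) (by simp)
  | cons m t =>
    have hperm := PySem.List.sorted_perm (PySem.Set.ofList (nums ++ [0])) (fun x : Int => x) false
    rw [hLcases] at hperm
    have hmemL : ∀ x : Int, x ∈ m :: t ↔ x ∈ PySem.Set.ofList (nums ++ [0]) :=
      fun x => hperm.mem_iff
    have hLpw := PySem.List.sorted_ofList_pairwise_lt (nums ++ [0])
    rw [hLcases] at hLpw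
    have hmin : PySem.List.min? (PySem.Set.ofList (nums ++ [0])) (fun x : Int => x) = some m := by
      cases hmq : PySem.List.min? (PySem.Set.ofList (nums ++ [0])) (fun x : Int => x) with
      | none =>
        have := (PySem.List.min?_eq_none_iff (PySem.Set.ofList (nums ++ [0])) (fun x : Int => x)).mp hmq
        rw [this] at h0s
        cases h0s
      | some m' =>
        have hm'mem := PySem.List.min?_mem hmq
        have hm'min := PySem.List.min?_isMin hmq
        have hmmem : m ∈ PySem.Set.ofList (nums ++ [0]) := (hmemL m).mp (List.mem_cons_self)
        have hmmin := PySem.List.key_head_sorted_le (PySem.Set.ofList (nums ++ [0]))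
          (fun x : Int => x) hLcases
        have : m' = m := le_antisymm (hm'min m hmmem) (hmmin m' hm'mem)
        rw [this]
    rw [hmin]
    show minimalKSumLoop m t k 0 = minimalKSumScan (PySem.Set.ofList (nums ++ [0])) m k 0
    exact (scan_eq_loop (k.toNat + t.length) (PySem.Set.ofList (nums ++ [0])) m k 0 t rfl hk
      (List.pairwise_cons.mp hLpw).2
      (fun x hx => ⟨(hmemL x).mp (List.mem_cons_of_mem _ hx), (List.pairwise_cons.mp hLpw).1 x hx⟩)
      (fun x hxs hxgt => by
        rcases List.mem_cons.mp ((hmemL x).mpr hxs) with h | h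
        · omega
        · exact h)).symm
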